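-- pv_equiv track=rewrite | github.com/HuseyinSAYGIN01/python | My Works/ntv_sozluk_olustur.py | sembolleritemizle
-- ===== SOURCE A (Python) =====
-- def sembolleritemizle(kelimelistesi):
--     sembolsuzkelimeler=[]
--     semboller="!@'^+%&/()=?_\"<>#${[]},.;-"+chr(775)
--     for kelime in kelimelistesi:
--         for sembol in semboller:
--             if sembol in kelime:
--                 kelime=kelime.replace(sembol,"")
--         if (len(kelime)>0):
--             sembolsuzkelimeler.append(kelime)
--     return sembolsuzkelimeler
-- ===== SOURCE B (Python) =====
-- def sembolleritemizle(kelimelistesi):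
--     semboller = set("!@'^+%&/()=?_\"<>#${[]},.;-" + chr(775))
--     sonuc = []
--     for kelime in kelimelistesi:
--         temiz = ''.join(c for c in kelime if c not in semboller)
--         if temiz:
--             sonuc.append(temiz)
--     return sonuc
-- ===== Notes on version B (the rewrite author's own statement) =====
-- stated objective: idiomatic
-- what changed: B builds a set of forbidden symbols once and cleans each word in a single character-level pass (join of a membership filter), instead of A's inner loop over the 27 symbols with a substring test and a full replace() scan per symbol.
import Mathlib
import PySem

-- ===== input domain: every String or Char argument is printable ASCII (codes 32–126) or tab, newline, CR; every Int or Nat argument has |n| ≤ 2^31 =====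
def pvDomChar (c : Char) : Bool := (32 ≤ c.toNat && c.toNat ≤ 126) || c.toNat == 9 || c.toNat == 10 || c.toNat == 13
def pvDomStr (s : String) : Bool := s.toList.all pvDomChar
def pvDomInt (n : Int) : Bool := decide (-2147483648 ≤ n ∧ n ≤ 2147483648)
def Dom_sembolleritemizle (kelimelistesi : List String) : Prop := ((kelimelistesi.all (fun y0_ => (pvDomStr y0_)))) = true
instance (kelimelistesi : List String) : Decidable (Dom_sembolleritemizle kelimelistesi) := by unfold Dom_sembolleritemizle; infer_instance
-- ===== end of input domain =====

-- B cleans each word in one character-level pass with a precomputed symbol set, instead of A's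
-- inner loop over the symbol string with substring test + replace per symbol.

-- ===== PORT A =====
-- semboller = "!@'^+%&/()=?_\"<>#${[]},.;-" + chr(775)
def pvSembollerA : String := "!@'^+%&/()=?_\"<>#${[]},.;-" ++ String.ofList [Char.ofNat 775]

def sembolleritemizle (kelimelistesi : List String) : List String :=
  -- sembolsuzkelimeler=[]; for kelime in kelimelistesi: for sembol in semboller: …
  kelimelistesi.foldl (fun sembolsuzkelimeler kelime0 =>
    let kelime := pvSembollerA.toList.foldl (fun kelime sembol =>
      if PySem.Str.isIn (String.ofList [sembol]) kelime then
        PySem.Str.replace kelime (String.ofList [sembol]) ""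
      else kelime) kelime0
    if PySem.Str.len kelime > 0 then sembolsuzkelimeler ++ [kelime] else sembolsuzkelimeler) []

-- ===== PORT B =====
-- semboller = set("!@'^+%&/()=?_\"<>#${[]},.;-" + chr(775))
def pvSembollerB : PySem.Set Char :=
  PySem.Set.ofList ("!@'^+%&/()=?_\"<>#${[]},.;-".toList ++ [Char.ofNat 775])

def sembolleritemizle_alt (kelimelistesi : List String) : List String :=
  kelimelistesi.foldl (fun sonuc kelime =>
    let temiz := String.ofList (kelime.toList.filter (fun c => !(PySem.Set.contains pvSembollerB c)))
    if temiz ≠ "" then sonuc ++ [temiz] else sonuc) []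

-- ===== PRECONDITION & SPEC =====
def Spec_sembolleritemizle (kelimelistesi : List String) (out : List String) : Prop := out = sembolleritemizle_alt kelimelistesi
instance (kelimelistesi : List String) (out : List String) : Decidable (Spec_sembolleritemizle kelimelistesi out) := by unfold Spec_sembolleritemizle; infer_instance

-- ===== CLAIM (what is proved, stated in full; the proofs are below) =====
def Claim_equal_sembolleritemizle : Prop := ∀ (kelimelistesi : List String), Dom_sembolleritemizle kelimelistesi → Spec_sembolleritemizle kelimelistesi (sembolleritemizle kelimelistesi)

-- ===== LEMMAS AND PROOFS =====

-- replace.go with a single-char pattern and empty replacement filters that char out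
theorem go_single (c : Char) : ∀ (fuel : Nat) (l acc : List Char), l.length ≤ fuel →
    PySem.Chars.replace.go [c] [] fuel l acc = acc.reverse ++ l.filter (fun x => !(x == c)) := by
  intro fuel
  induction fuel with
  | zero =>
    intro l acc h
    have : l = [] := List.eq_nil_of_length_eq_zero (Nat.le_zero.mp h)
    subst this
    simp [PySem.Chars.replace.go]
  | succ n ih =>
    intro l acc h
    cases l with
    | nil => simp [PySem.Chars.replace.go]
    | cons c' t =>
      rw [PySem.Chars.replace.go]
      by_cases hc : c' = c
      · subst hc
        simp only [List.isPrefixOf, BEq.rfl, Bool.true_and, if_true,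
          List.length_singleton, List.drop_succ_cons, List.drop_zero]
        simp only [List.length_cons] at h
        rw [ih _ _ (by omega)]
        simp
      · have : List.isPrefixOf [c] (c' :: t) = false := by
          simp [List.isPrefixOf]
          exact fun hcc => absurd hcc.symm hc
        rw [this]
        simp only [Bool.false_eq_true, if_false]
        simp only [List.length_cons] at h
        rw [ih _ _ (by omega)]
        simp [hc]

theorem replace_single (s : String) (c : Char) :
    (PySem.Str.replace s (String.ofList [c]) "").toList = s.toList.filter (fun x => !(x == c)) := by
  rw [PySem.Str.toList_replace]
  simp only [String.toList_ofList, String.toList_empty]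
  rw [PySem.Chars.replace]
  simp only [List.isEmpty_cons, Bool.false_eq_true, if_false]
  rw [go_single c _ _ _ (le_refl _)]
  simp

-- one step of A's inner loop filters out that symbol (whether or not it occurs)
theorem step_filter (w : String) (c : Char) :
    ((if PySem.Str.isIn (String.ofList [c]) w then PySem.Str.replace w (String.ofList [c]) "" else w)).toList
      = w.toList.filter (fun x => !(x == c)) := by
  by_cases h : PySem.Str.isIn (String.ofList [c]) w = true
  · rw [if_pos h]; exact replace_single w c
  · rw [if_neg h]
    have h' : PySem.Chars.isIn [c] w.toList = false := by
      simpa using Bool.eq_false_iff.mpr h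
    have hmem : c ∉ w.toList := by
      intro hm
      obtain ⟨s1, t1, hst⟩ := List.append_of_mem hm
      have : [c] <:+: w.toList := ⟨s1, t1, by rw [hst]; simp⟩
      rw [← PySem.Chars.isIn_iff_infix] at this
      simp [this] at h'
    symm
    rw [List.filter_eq_self]
    intro a ha
    simp only [Bool.not_eq_eq_eq_not, Bool.not_true, beq_eq_false_iff_ne, ne_eq]
    intro hac; exact hmem (hac ▸ ha)

-- A's whole inner loop filters out every symbol of the list
theorem inner_filter (syms : List Char) : ∀ (w : String),
    (syms.foldl (fun kelime sembol =>
        if PySem.Str.isIn (String.ofList [sembol]) kelime then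
          PySem.Str.replace kelime (String.ofList [sembol]) "" else kelime) w).toList
      = w.toList.filter (fun ch => !(syms.contains ch)) := by
  induction syms with
  | nil => intro w; simp
  | cons c cs ih =>
    intro w
    rw [List.foldl_cons, ih, step_filter, List.filter_filter]
    apply List.filter_congr
    intro a _
    simp [Bool.and_comm, beq_eq_decide]

-- the two symbol collections contain the same characters
theorem syms_agree (ch : Char) :
    (PySem.Set.contains pvSembollerB ch) = pvSembollerA.toList.contains ch := by
  have hB : PySem.Set.contains pvSembollerB ch = true ↔ ch ∈ ("!@'^+%&/()=?_\"<>#${[]},.;-".toList ++ [Char.ofNat 775]) := by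
    rw [PySem.Set.contains_iff]
    exact PySem.Set.mem_ofList _ ch
  have hA : pvSembollerA.toList.contains ch = true ↔ ch ∈ ("!@'^+%&/()=?_\"<>#${[]},.;-".toList ++ [Char.ofNat 775]) := by
    simp [pvSembollerA]
  by_cases h : ch ∈ ("!@'^+%&/()=?_\"<>#${[]},.;-".toList ++ [Char.ofNat 775])
  · rw [hB.mpr h, hA.mpr h]
  · rw [Bool.eq_false_iff.mpr (fun hx => h (hB.mp hx)),
        Bool.eq_false_iff.mpr (fun hx => h (hA.mp hx))]

-- ===== VERDICT (by name: the statement is the Claim_ definition above) =====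
theorem sembolleritemizle_spec : Claim_equal_sembolleritemizle := by
  intro kelimelistesi _
  show sembolleritemizle kelimelistesi = sembolleritemizle_alt kelimelistesi
  unfold sembolleritemizle sembolleritemizle_alt
  have hfun : (fun (sembolsuzkelimeler : List String) (kelime0 : String) =>
      let kelime := pvSembollerA.toList.foldl (fun kelime sembol =>
        if PySem.Str.isIn (String.ofList [sembol]) kelime then
          PySem.Str.replace kelime (String.ofList [sembol]) ""
        else kelime) kelime0
      if PySem.Str.len kelime > 0 then sembolsuzkelimeler ++ [kelime] else sembolsuzkelimeler)
    = (fun (sonuc : List String) (kelime : String) =>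
      let temiz := String.ofList (kelime.toList.filter (fun c => !(PySem.Set.contains pvSembollerB c)))
      if temiz ≠ "" then sonuc ++ [temiz] else sonuc) := by
    funext acc w
    simp only []
    have hclean : (pvSembollerA.toList.foldl (fun kelime sembol =>
        if PySem.Str.isIn (String.ofList [sembol]) kelime then
          PySem.Str.replace kelime (String.ofList [sembol]) ""
        else kelime) w)
        = String.ofList (w.toList.filter (fun c => !(PySem.Set.contains pvSembollerB c))) := by
      apply String.toList_inj.mp
      rw [inner_filter]
      have : (fun ch => !(pvSembollerA.toList.contains ch))
           = (fun c => !(PySem.Set.contains pvSembollerB c)) := by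
        funext ch; rw [syms_agree]
      rw [this]
      simp
    rw [hclean]
    set temiz := String.ofList (w.toList.filter (fun c => !(PySem.Set.contains pvSembollerB c))) with ht
    have hcond : (PySem.Str.len temiz > 0) ↔ (temiz ≠ "") := by
      rw [PySem.Str.len_eq]
      constructor
      · intro h he
        rw [he] at h
        simp at h
      · intro h
        have : temiz.toList ≠ [] := fun he => h (String.toList_inj.mp (by simp [he]))
        have := List.length_pos_iff.mpr this
        exact_mod_cast this
    by_cases h : temiz ≠ ""
    · rw [if_pos h, if_pos (by exact_mod_cast hcond.mpr h)]
    · rw [if_neg h, if_neg (fun hx => h (hcond.mp hx))]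
  rw [hfun]
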